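-- pv_equiv track=rewrite | github.com/MohabASHRAF-byte/CodeForces_Checker | OOP/test_checker.py | segment_checker
-- ===== SOURCE A (Python) =====
-- def assign_char(idx: int, li: str):
--     tmp = '*'
--     try:
--         tmp = li[idx]
--     except Exception:
--         pass
--     return tmp
--
-- def segment_checker(user: str, code: str):
--     s = str()
--     for i in range(max(len(user), len(code))):
--         userChar = assign_char(i, user)
--         codeChar = assign_char(i, code)
--         if userChar == codeChar:
--             s += userChar
--         else:
--             s += '*'
--     return s
-- ===== SOURCE B (Python) =====
-- def segment_checker(user: str, code: str):
--     merged = ''.join(u if u == c else '*' for u, c in zip(user, code))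
--     return merged + '*' * abs(len(user) - len(code))
-- ===== Notes on version B (the rewrite author's own statement) =====
-- stated objective: simpler
-- what changed: B iterates only over the common prefix via zip (emitting u or '*') joined in one pass, and appends the tail as a closed-form '*' * abs(len difference), instead of A's max-length loop with a try/except indexing sentinel and string += per character.
import Mathlib
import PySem

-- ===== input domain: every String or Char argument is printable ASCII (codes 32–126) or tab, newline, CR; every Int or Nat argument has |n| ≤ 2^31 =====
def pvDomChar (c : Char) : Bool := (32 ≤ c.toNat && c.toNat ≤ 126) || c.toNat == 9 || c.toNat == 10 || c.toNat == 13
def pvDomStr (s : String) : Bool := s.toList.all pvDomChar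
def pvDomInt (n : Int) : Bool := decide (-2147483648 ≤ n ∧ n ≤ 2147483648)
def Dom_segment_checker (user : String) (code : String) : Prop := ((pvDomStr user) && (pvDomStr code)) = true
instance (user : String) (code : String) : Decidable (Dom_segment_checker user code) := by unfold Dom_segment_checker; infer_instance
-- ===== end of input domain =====

-- B replaces A's max-length loop with try/except index sentinels by a zip over the
-- common prefix plus a closed-form '*'-padding tail (objective: simpler).

-- ===== PORT A =====
-- assign_char: tmp = '*'; try: tmp = li[idx]; except: pass; return tmp
def assign_char (idx : Int) (li : String) : Char :=
  match PySem.Str.pyGet? li idx with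
  | some c => c
  | none => '*'

-- the string accumulator is carried as List Char and wrapped by String.mk at return
def segment_checker (user : String) (code : String) : String :=
  String.mk
    ((PySem.List.pyRange 0 (max (PySem.Str.len user) (PySem.Str.len code)) 1).foldl
      (fun s i =>
        let userChar := assign_char i user
        let codeChar := assign_char i code
        if userChar == codeChar then s ++ [userChar] else s ++ ['*'])
      ([] : List Char))

-- ===== PORT B =====
def segment_checker_alt (user : String) (code : String) : String :=
  String.mk
    (((user.toList.zip code.toList).map (fun p => if p.1 == p.2 then p.1 else '*'))
      ++ List.replicate ((PySem.Str.len user - PySem.Str.len code).natAbs) '*')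

-- ===== PRECONDITION & SPEC =====
def Spec_segment_checker (user : String) (code : String) (out : String) : Prop := out = segment_checker_alt user code
instance (user : String) (code : String) (out : String) : Decidable (Spec_segment_checker user code out) := by unfold Spec_segment_checker; infer_instance

-- ===== CLAIM (what is proved, stated in full; the proofs are below) =====
def Claim_equal_segment_checker : Prop := ∀ (user : String) (code : String), Dom_segment_checker user code → Spec_segment_checker user code (segment_checker user code)

-- ===== LEMMAS AND PROOFS =====

theorem assign_char_eq (i : Int) (li : String) :
    assign_char i li = (PySem.Str.pyGet? li i).getD '*' := by
  unfold assign_char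
  cases PySem.Str.pyGet? li i <;> rfl

theorem foldl_ite_append {α β : Type} (l : List α) (P : α → Bool) (f g : α → β)
    (init : List β) :
    l.foldl (fun s i => if P i then s ++ [f i] else s ++ [g i]) init
      = init ++ l.map (fun i => if P i then f i else g i) := by
  induction l generalizing init with
  | nil => simp
  | cons x xs ih => simp [ih]; split <;> simp

theorem merge_key (u c : List Char) :
    (List.range (max u.length c.length)).map
        (fun k => if (u.getD k '*' == c.getD k '*')
                  then u.getD k '*' else '*')
      = (u.zip c).map (fun p => if p.1 == p.2 then p.1 else '*')
          ++ List.replicate ((u.length : Int) - (c.length : Int)).natAbs '*' := by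
  apply List.ext_getElem
  · simp [List.length_zip]; omega
  · intro k hk1 hk2
    simp only [List.getElem_map, List.getElem_range]
    have hk : k < max u.length c.length := by simpa using hk1
    by_cases hmin : k < min u.length c.length
    · have hu : k < u.length := lt_of_lt_of_le hmin (min_le_left _ _)
      have hc : k < c.length := lt_of_lt_of_le hmin (min_le_right _ _)
      rw [List.getElem_append_left (by simp [List.length_zip]; omega)]
      simp [List.getElem_zip, List.getD_eq_getElem?_getD,
        List.getElem?_eq_getElem hu, List.getElem?_eq_getElem hc]
    · rw [List.getElem_append_right (by simp [List.length_zip]; omega)]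
      simp only [List.getElem_replicate]
      by_cases hu : k < u.length
      · have hc : getElem? c k = none := by
          rw [List.getElem?_eq_none_iff]; omega
        simp only [List.getD_eq_getElem?_getD, hc, Option.getD_none,
          List.getElem?_eq_getElem hu, Option.getD_some]
        split
        · next h => exact eq_of_beq h
        · rfl
      · have hun : getElem? u k = none := by
          rw [List.getElem?_eq_none_iff]; omega
        simp only [List.getD_eq_getElem?_getD, hun, Option.getD_none]
        split <;> rfl

theorem segment_checker_spec : Claim_equal_segment_checker := by
  intro user code _
  unfold Spec_segment_checker segment_checker segment_checker_alt
  have hmax : max (PySem.Str.len user) (PySem.Str.len code)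
      = ((max user.toList.length code.toList.length : Nat) : Int) := by
    simp [PySem.Str.len_eq]
  rw [hmax, PySem.List.pyRange_zero_natCast, List.foldl_map]
  simp only [assign_char_eq, PySem.Str.pyGet?_natCast]
  rw [foldl_ite_append]
  simp only [← List.getD_eq_getElem?_getD]
  rw [merge_key user.toList code.toList]
  simp [PySem.Str.len_eq]
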